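-- pv_equiv track=rewrite | github.com/aorursy/KT_dataset_py | fangty123_hcde-530-a3.py | getMostDifference
-- ===== SOURCE A (Python) =====
-- def getMostDifference(difference):
--
--     most_increment_name, most_decrement_name = '', ''
--
--     most_increment_popularity, most_decrement_popularity = 0, 0
--
--     for name in difference.keys():
--
--         if difference[name] > most_increment_popularity:
--
--             most_increment_popularity = difference[name]
--
--             most_increment_name = name
--
--         elif difference[name] < most_decrement_popularity:
--
--             most_decrement_popularity = difference[name]
--
--             most_decrement_name = name
--
--     return most_increment_name, most_decrement_name
-- ===== SOURCE B (Python) =====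
-- def getMostDifference(difference):
--     positives = [name for name in difference if difference[name] > 0]
--     negatives = [name for name in difference if difference[name] < 0]
--     most_increment_name = max(positives, key=difference.get) if positives else ''
--     most_decrement_name = min(negatives, key=difference.get) if negatives else ''
--     return most_increment_name, most_decrement_name
-- ===== Notes on version B (the rewrite author's own statement) =====
-- stated objective: simpler
-- what changed: The single manual four-variable accumulation loop with an if/elif chain is replaced by two filter passes (positive and negative differences) followed by built-in max/min with key=difference.get, falling back to '' when the filtered list is empty.
import Mathlib
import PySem

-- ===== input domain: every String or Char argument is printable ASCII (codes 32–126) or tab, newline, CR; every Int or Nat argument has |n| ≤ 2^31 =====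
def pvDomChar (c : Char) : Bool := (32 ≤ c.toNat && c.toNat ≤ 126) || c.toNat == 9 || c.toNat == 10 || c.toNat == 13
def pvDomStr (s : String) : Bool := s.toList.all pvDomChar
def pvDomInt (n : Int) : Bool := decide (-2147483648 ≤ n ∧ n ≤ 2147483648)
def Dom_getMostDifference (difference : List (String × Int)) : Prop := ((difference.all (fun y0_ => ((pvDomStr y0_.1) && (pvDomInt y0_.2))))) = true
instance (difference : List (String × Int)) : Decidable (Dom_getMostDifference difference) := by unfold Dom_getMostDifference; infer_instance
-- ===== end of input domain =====

-- B replaces A's single four-variable if/elif accumulation loop by two filter passes and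
-- built-in first-extremal max/min with the dict lookup as key ('' on an empty filter): simpler decomposition, same O(n) cost.

-- ===== PORT A =====
-- the loop body of A: state = (most_increment_name, most_decrement_name, most_increment_popularity, most_decrement_popularity)
def pvStepA (g : String → Int) (acc : String × String × Int × Int) (name : String) : String × String × Int × Int :=
  if g name > acc.2.2.1 then (name, acc.2.1, g name, acc.2.2.2)
  else if g name < acc.2.2.2 then (acc.1, name, acc.2.2.1, g name)
  else acc

def getMostDifference (difference : List (String × Int)) : String × String :=
  let d := PySem.Dict.ofList difference
  let st := d.keys.foldl (pvStepA (fun n => d.getD n 0)) ("", "", 0, 0)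
  (st.1, st.2.1)

-- ===== PORT B =====
def getMostDifference_alt (difference : List (String × Int)) : String × String :=
  let d := PySem.Dict.ofList difference
  let g := fun n => d.getD n 0
  let positives := d.keys.filter (fun n => g n > 0)
  let negatives := d.keys.filter (fun n => g n < 0)
  ((if positives.isEmpty then "" else (PySem.List.max? positives g).getD ""),
   (if negatives.isEmpty then "" else (PySem.List.min? negatives g).getD ""))

-- ===== PRECONDITION & SPEC =====
def Spec_getMostDifference (difference : List (String × Int)) (out : String × String) : Prop := out = getMostDifference_alt difference
instance (difference : List (String × Int)) (out : String × String) : Decidable (Spec_getMostDifference difference out) := by unfold Spec_getMostDifference; infer_instance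

-- ===== CLAIM (what is proved, stated in full; the proofs are below) =====
def Claim_equal_getMostDifference : Prop := ∀ (difference : List (String × Int)), Dom_getMostDifference difference → Spec_getMostDifference difference (getMostDifference difference)

-- ===== LEMMAS AND PROOFS =====

-- the fold step inside PySem.List.max? / min? (definitionally equal to them)
def pvMaxStep (g : String → Int) (acc : Option String) (x : String) : Option String :=
  match acc with
  | none => some x
  | some m => if g m < g x then some x else some m

def pvMinStep (g : String → Int) (acc : Option String) (x : String) : Option String :=
  match acc with
  | none => some x
  | some m => if g x < g m then some x else some m

-- coupling invariants between A's (name, popularity) pair and B's Option state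
def pvRI (g : String → Int) (iN : String) (iP : Int) (o : Option String) : Prop :=
  (o = none ∧ iN = "" ∧ iP = 0) ∨ (∃ n, o = some n ∧ iN = n ∧ iP = g n ∧ 0 < g n)

def pvRD (g : String → Int) (dN : String) (dP : Int) (o : Option String) : Prop :=
  (o = none ∧ dN = "" ∧ dP = 0) ∨ (∃ n, o = some n ∧ dN = n ∧ dP = g n ∧ g n < 0)

lemma pvMain (g : String → Int) (l : List String) :
    ∀ (iN dN : String) (iP dP : Int) (oI oD : Option String),
    pvRI g iN iP oI → pvRD g dN dP oD →
    pvRI g (l.foldl (pvStepA g) (iN, dN, iP, dP)).1 (l.foldl (pvStepA g) (iN, dN, iP, dP)).2.2.1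
      ((l.filter (fun n => decide (0 < g n))).foldl (pvMaxStep g) oI) ∧
    pvRD g (l.foldl (pvStepA g) (iN, dN, iP, dP)).2.1 (l.foldl (pvStepA g) (iN, dN, iP, dP)).2.2.2
      ((l.filter (fun n => decide (g n < 0))).foldl (pvMinStep g) oD) := by
  induction l with
  | nil => intro iN dN iP dP oI oD hI hD; exact ⟨hI, hD⟩
  | cons x t ih =>
    intro iN dN iP dP oI oD hI hD
    have hiP : 0 ≤ iP := by
      rcases hI with ⟨_, _, h⟩ | ⟨n, _, _, h3, h4⟩ <;> omega
    have hdP : dP ≤ 0 := by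
      rcases hD with ⟨_, _, h⟩ | ⟨n, _, _, h3, h4⟩ <;> omega
    simp only [List.foldl_cons, List.filter_cons]
    by_cases hx1 : g x > iP
    · have hx0 : (0 : Int) < g x := by omega
      have hstep : pvStepA g (iN, dN, iP, dP) x = (x, dN, g x, dP) := by
        simp [pvStepA, hx1]
      have hmax : pvMaxStep g oI x = some x := by
        rcases hI with ⟨h1, _, _⟩ | ⟨n, h1, _, h3, _⟩
        · simp [pvMaxStep, h1]
        · simp [pvMaxStep, h1]; omega
      simp only [hstep, hx0, decide_true, if_pos, List.foldl_cons, hmax]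
      have hneg : decide (g x < 0) = false := by simp; omega
      rw [hneg]
      simp only [Bool.false_eq_true, if_false]
      exact ih x dN (g x) dP (some x) oD (Or.inr ⟨x, rfl, rfl, rfl, hx0⟩) hD
    · by_cases hx2 : g x < dP
      · have hx0 : g x < 0 := by omega
        have hstep : pvStepA g (iN, dN, iP, dP) x = (iN, x, iP, g x) := by
          simp [pvStepA, hx1, hx2]
        have hmin : pvMinStep g oD x = some x := by
          rcases hD with ⟨h1, _, _⟩ | ⟨n, h1, _, h3, _⟩
          · simp [pvMinStep, h1]
          · simp [pvMinStep, h1]; omega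
        have hpos : decide (0 < g x) = false := by simp; omega
        simp only [hstep, hx0, decide_true, if_pos, List.foldl_cons, hmin, hpos,
          Bool.false_eq_true, if_false]
        exact ih iN x iP (g x) oI (some x) hI (Or.inr ⟨x, rfl, rfl, rfl, hx0⟩)
      · have hstep : pvStepA g (iN, dN, iP, dP) x = (iN, dN, iP, dP) := by
          simp [pvStepA, hx1, hx2]
        by_cases hpx : (0 : Int) < g x
        · -- g x ≤ iP, oI must be some m with g x ≤ g m, step keeps oI
          rcases hI with ⟨h1, _, h3⟩ | ⟨n, h1, h2, h3, h4⟩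
          · omega
          · have hkeep : pvMaxStep g oI x = oI := by
              simp [pvMaxStep, h1]; omega
            have hneg : decide (g x < 0) = false := by simp; omega
            simp only [hstep, hpx, decide_true, if_pos, List.foldl_cons, hkeep, hneg,
              Bool.false_eq_true, if_false]
            exact ih iN dN iP dP oI oD (Or.inr ⟨n, h1, h2, h3, h4⟩) hD
        · by_cases hnx : g x < 0
          · rcases hD with ⟨h1, _, h3⟩ | ⟨n, h1, h2, h3, h4⟩
            · omega
            · have hkeep : pvMinStep g oD x = oD := by
                simp [pvMinStep, h1]; omega
              have hposf : decide (0 < g x) = false := by simp; omega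
              simp only [hstep, hnx, decide_true, if_pos, List.foldl_cons, hkeep, hposf,
                Bool.false_eq_true, if_false]
              exact ih iN dN iP dP oI oD hI (Or.inr ⟨n, h1, h2, h3, h4⟩)
          · have hposf : decide (0 < g x) = false := by simp; omega
            have hnegf : decide (g x < 0) = false := by simp; omega
            simp only [hstep, hposf, hnegf, Bool.false_eq_true, if_false]
            exact ih iN dN iP dP oI oD hI hD

-- ===== VERDICT (by name: the statement is the Claim_ definition above) =====
lemma pvMax?_eq_foldl (g : String → Int) (xs : List String) :
    PySem.List.max? xs g = xs.foldl (pvMaxStep g) none := by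
  unfold PySem.List.max?
  congr 1
  funext acc x
  cases acc <;> rfl

lemma pvMin?_eq_foldl (g : String → Int) (xs : List String) :
    PySem.List.min? xs g = xs.foldl (pvMinStep g) none := by
  unfold PySem.List.min?
  congr 1
  funext acc x
  cases acc <;> rfl

theorem getMostDifference_spec : Claim_equal_getMostDifference := by
  intro difference _
  unfold Spec_getMostDifference getMostDifference getMostDifference_alt
  dsimp only [gt_iff_lt]
  set d := PySem.Dict.ofList difference with hd
  set g : String → Int := fun n => d.getD n 0 with hg
  set l := d.keys with hl
  have h := pvMain g l "" "" 0 0 none none (Or.inl ⟨rfl, rfl, rfl⟩) (Or.inl ⟨rfl, rfl, rfl⟩)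
  set st := l.foldl (pvStepA g) ("", "", 0, 0) with hst
  simp only [Prod.mk.injEq]
  rw [← pvMax?_eq_foldl, ← pvMin?_eq_foldl] at h
  constructor
  · by_cases he : (l.filter (fun n => decide (0 < g n))).isEmpty
    · rw [if_pos he]
      have hnone : PySem.List.max? (l.filter (fun n => decide (0 < g n))) g = none := by
        rw [PySem.List.max?_eq_none_iff]
        exact List.isEmpty_iff.mp he
      rcases h.1 with ⟨_, h2, _⟩ | ⟨n, h1, _, _, _⟩
      · exact h2
      · rw [hnone] at h1; exact absurd h1 (by simp)
    · rw [if_neg he]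
      rcases h.1 with ⟨h1, _, _⟩ | ⟨n, h1, h2, _, _⟩
      · rw [PySem.List.max?_eq_none_iff] at h1
        exact absurd (List.isEmpty_iff.mpr h1) he
      · rw [h1]; exact h2
  · by_cases he : (l.filter (fun n => decide (g n < 0))).isEmpty
    · rw [if_pos he]
      have hnone : PySem.List.min? (l.filter (fun n => decide (g n < 0))) g = none := by
        rw [PySem.List.min?_eq_none_iff]
        exact List.isEmpty_iff.mp he
      rcases h.2 with ⟨_, h2, _⟩ | ⟨n, h1, _, _, _⟩
      · exact h2
      · rw [hnone] at h1; exact absurd h1 (by simp)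
    · rw [if_neg he]
      rcases h.2 with ⟨h1, _, _⟩ | ⟨n, h1, h2, _, _⟩
      · rw [PySem.List.min?_eq_none_iff] at h1
        exact absurd (List.isEmpty_iff.mpr h1) he
      · rw [h1]; exact h2
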